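-- pv_equiv track=rewrite | github.com/j2brenta/obsidian-telegram | src/processors/content_analyzer.py | _sanitize_folder_path
-- ===== SOURCE A (Python) =====
-- def _sanitize_folder_path(folder: str) -> str:
--     """
--     Sanitize folder path.
--
--     Args:
--         folder: Raw folder path
--
--     Returns:
--         Sanitized folder path
--     """
--     if not folder or not folder.strip():
--         return "Inbox"
--
--     # Remove leading/trailing slashes
--     folder = folder.strip('/')
--
--     # Remove invalid characters
--     invalid_chars = ['\\', ':', '*', '?', '"', '<', '>', '|']
--     for char in invalid_chars:
--         folder = folder.replace(char, '-')
--
--     return folder or "Inbox"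
-- ===== SOURCE B (Python) =====
-- _INVALID = set('\\:*?"<>|')
--
--
-- def _sanitize_folder_path(folder: str) -> str:
--     if not folder or not folder.strip():
--         return "Inbox"
--     folder = folder.strip('/')
--     result = ''.join('-' if c in _INVALID else c for c in folder)
--     return result or "Inbox"
-- ===== Notes on version B (the rewrite author's own statement) =====
-- stated objective: simpler
-- what changed: Replaces the loop of eight full-string str.replace sweeps with a single pass over the stripped string, substituting a dash for each character found in the invalid-character set.
import Mathlib
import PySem

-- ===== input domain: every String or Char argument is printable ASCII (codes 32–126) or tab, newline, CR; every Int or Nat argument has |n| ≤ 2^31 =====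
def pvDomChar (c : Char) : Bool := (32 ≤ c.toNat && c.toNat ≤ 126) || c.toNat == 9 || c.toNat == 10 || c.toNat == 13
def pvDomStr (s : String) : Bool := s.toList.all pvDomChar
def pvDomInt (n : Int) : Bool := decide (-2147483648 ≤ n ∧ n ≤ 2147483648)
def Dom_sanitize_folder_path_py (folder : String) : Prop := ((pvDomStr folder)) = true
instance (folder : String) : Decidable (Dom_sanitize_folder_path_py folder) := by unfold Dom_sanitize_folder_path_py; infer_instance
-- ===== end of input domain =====

-- B replaces A's eight full-string replace sweeps with one pass using set membership (objective: simpler).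

-- ===== PORT A =====
def pvInvalidStrs : List String := ["\\", ":", "*", "?", "\"", "<", ">", "|"]

def sanitize_folder_path_py (folder : String) : String :=
  if folder == "" || PySem.Str.strip folder == "" then "Inbox"
  else
    let f := PySem.Str.stripChars folder "/"
    let f := pvInvalidStrs.foldl (fun s c => PySem.Str.replace s c "-") f
    if f == "" then "Inbox" else f

-- ===== PORT B =====
-- the Python set('\\:*?"<>|') of the 8 invalid characters (all distinct)
def pvInvalidSet : List Char := ['\\', ':', '*', '?', '"', '<', '>', '|']

def sanitize_folder_path_py_alt (folder : String) : String :=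
  if folder == "" || PySem.Str.strip folder == "" then "Inbox"
  else
    let stripped := PySem.Str.stripChars folder "/"
    let result := String.ofList (stripped.toList.map (fun c => if c ∈ pvInvalidSet then '-' else c))
    if result == "" then "Inbox" else result

-- ===== PRECONDITION & SPEC =====
def Spec_sanitize_folder_path_py (folder : String) (out : String) : Prop := out = sanitize_folder_path_py_alt folder
instance (folder : String) (out : String) : Decidable (Spec_sanitize_folder_path_py folder out) := by unfold Spec_sanitize_folder_path_py; infer_instance

-- ===== CLAIM (what is proved, stated in full; the proofs are below) =====
def Claim_equal_sanitize_folder_path_py : Prop := ∀ (folder : String), Dom_sanitize_folder_path_py folder → Spec_sanitize_folder_path_py folder (sanitize_folder_path_py folder)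

-- ===== LEMMAS AND PROOFS =====

-- a single-character replace is a pointwise map
lemma replace_go_single (a b : Char) :
    ∀ (fuel : Nat) (cs acc : List Char), cs.length ≤ fuel →
      PySem.Chars.replace.go [a] [b] fuel cs acc =
        acc.reverse ++ cs.map (fun c => if c = a then b else c) := by
  intro fuel
  induction fuel with
  | zero =>
    intro cs acc h
    have : cs = [] := List.length_eq_zero_iff.mp (Nat.le_zero.mp h)
    subst this
    simp [PySem.Chars.replace.go]
  | succ n ih =>
    intro cs acc h
    cases cs with
    | nil => simp [PySem.Chars.replace.go]
    | cons c t =>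
      have ht : t.length ≤ n := by simpa using Nat.le_of_succ_le_succ (by simpa using h)
      by_cases hc : c = a
      · subst hc
        have hpre : List.isPrefixOf [c] (c :: t) = true := by
          simp [List.isPrefixOf]
        rw [PySem.Chars.replace.go]
        simp only [hpre, if_true, List.length_cons, List.length_nil, Nat.zero_add,
          List.drop_succ_cons, List.drop_zero]
        rw [ih t _ ht]
        simp
      · have hpre : List.isPrefixOf [a] (c :: t) = false := by
          simp only [List.isPrefixOf, Bool.and_true,
            beq_eq_false_iff_ne, ne_eq]
          exact fun h' => hc h'.symm
        rw [PySem.Chars.replace.go]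
        simp only [hpre, Bool.false_eq_true, if_false]
        rw [ih t _ ht]
        simp [hc]

lemma replace_single (a b : Char) (cs : List Char) :
    PySem.Chars.replace cs [a] [b] = cs.map (fun c => if c = a then b else c) := by
  rw [PySem.Chars.replace]
  simp only [List.isEmpty_cons, Bool.false_eq_true, if_false]
  exact (replace_go_single a b cs.length cs [] le_rfl).trans (by simp)

-- folding single-char substitutions over a list L (with '-' not in L) is one membership map
lemma foldl_substs (L : List Char) (hL : '-' ∉ L) :
    ∀ cs : List Char, L.foldl (fun s a => PySem.Chars.replace s [a] ['-']) cs =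
      cs.map (fun c => if c ∈ L then '-' else c) := by
  induction L with
  | nil => intro cs; simp
  | cons a rest ih =>
    intro cs
    have hrest : '-' ∉ rest := fun h => hL (List.mem_cons_of_mem _ h)
    have ha : ¬ ('-' : Char) = a := fun h => hL (h ▸ List.mem_cons_self)
    rw [List.foldl_cons, replace_single, ih hrest, List.map_map]
    apply List.map_congr_left
    intro c _
    simp only [Function.comp, List.mem_cons]
    split_ifs <;> simp_all

-- A's foldl over one-char strings, seen through toList, is the foldl over the chars
lemma foldlA_toList (s : String) :
    (pvInvalidStrs.foldl (fun s c => PySem.Str.replace s c "-") s).toList =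
      pvInvalidSet.foldl (fun s a => PySem.Chars.replace s [a] ['-']) s.toList := by
  simp only [pvInvalidStrs, pvInvalidSet, List.foldl_cons, List.foldl_nil,
    PySem.Str.toList_replace, String.reduceToList]

-- ===== VERDICT (by name: the statement is the Claim_ definition above) =====
theorem sanitize_folder_path_py_spec : Claim_equal_sanitize_folder_path_py := by
  intro folder _
  unfold Spec_sanitize_folder_path_py sanitize_folder_path_py sanitize_folder_path_py_alt
  by_cases hg : (folder == "" || PySem.Str.strip folder == "") = true
  · simp [hg]
  · simp only [Bool.not_eq_true] at hg
    simp only [hg, Bool.false_eq_true, if_false]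
    have key : (pvInvalidStrs.foldl (fun s c => PySem.Str.replace s c "-")
        (PySem.Str.stripChars folder "/")) =
        String.ofList ((PySem.Str.stripChars folder "/").toList.map
          (fun c => if c ∈ pvInvalidSet then '-' else c)) := by
      apply String.toList_inj.mp
      rw [String.toList_ofList]
      rw [foldlA_toList]
      exact foldl_substs pvInvalidSet (by decide) _
    rw [key]
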